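-- pv_equiv track=rewrite | github.com/moguonyanko/algorithmer | python/algorithm.py | find
-- ===== SOURCE A (Python) =====
-- def find(s):
-- 	size = len(s)
-- 	rng = range(size)
--
-- 	for i in rng:
-- 		matchflag = True
-- 		for j in rng:
-- 			opposite_index = i - j - 1
-- 			#比較する文字を1つずつずらすことで「1文字追加される」という処理を表現している。
-- 			#「1文字追加される」ことで反対側の文字が存在するようになる。
-- 			if opposite_index < size and s[j] != s[opposite_index]:
-- 				matchflag = False
-- 				break
--
-- 		if matchflag == True: return i+size
--
-- 	return size*2-1 #両端から突き合わせたが全く一致しなかった。最長の回文の文字数を返す。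
-- ===== SOURCE B (Python) =====
-- def find(s):
--     size = len(s)
--     pos = (s + s).find(s[::-1])
--     if pos != -1:
--         return pos + size
--     return 2 * size - 1
-- ===== Notes on version B (the rewrite author's own statement) =====
-- stated objective: faster
-- what changed: Replaced A's quadratic nested index loops by a single substring search: the smallest symmetry axis i is the first occurrence of reversed(s) in s+s, found with str.find.
-- intended difference: On the empty string A returns -1 (the fall-through 2*size-1), B returns 0: the empty string is a palindrome with axis 0, so 0 is the intended value. — e.g. on find(""): A returns -1, B returns 0
import Mathlib
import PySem

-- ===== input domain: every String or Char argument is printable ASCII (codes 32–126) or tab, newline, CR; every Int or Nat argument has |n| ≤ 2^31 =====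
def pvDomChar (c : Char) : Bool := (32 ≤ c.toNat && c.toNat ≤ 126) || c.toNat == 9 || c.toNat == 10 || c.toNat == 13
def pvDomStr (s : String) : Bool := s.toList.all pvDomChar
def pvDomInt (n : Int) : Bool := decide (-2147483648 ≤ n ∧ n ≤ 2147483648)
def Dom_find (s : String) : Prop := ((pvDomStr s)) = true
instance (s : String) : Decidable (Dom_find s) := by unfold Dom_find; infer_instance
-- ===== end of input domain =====

-- B replaces A's quadratic double loop by a single substring search of reversed(s) in s+s (same first axis); return values only, no mutation involved.

-- ===== PORT A =====
-- inner 'for j in rng' loop with its break (returns the final matchflag)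
def innerLoopA (l : List Char) (i : Int) : List Int → Bool
  | [] => true
  | j :: js =>
    let opposite : Int := i - j - 1
    if opposite < PySem.List.len l ∧ PySem.List.pyGet? l j ≠ PySem.List.pyGet? l opposite then
      false
    else
      innerLoopA l i js

-- outer 'for i in rng' loop with its early return
def outerLoopA (l : List Char) (rng : List Int) : List Int → Int
  | [] => 2 * PySem.List.len l - 1
  | i :: is => if innerLoopA l i rng then i + PySem.List.len l else outerLoopA l rng is

def find (s : String) : Int :=
  let l := s.toList
  let rng := PySem.List.pyRange 0 (PySem.List.len l) 1
  outerLoopA l rng rng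

-- ===== PORT B =====
def find_alt (s : String) : Int :=
  let l := s.toList
  let pos := PySem.Chars.find (l ++ l) l.reverse   -- (s + s).find(s[::-1])
  if pos ≠ -1 then pos + PySem.List.len l else 2 * PySem.List.len l - 1

-- ===== PRECONDITION & SPEC =====
-- On the empty string A returns -1 (the fall-through 2*size-1), while B returns 0: the empty string is a palindrome with axis 0, so 0 is the intended result.
def D_find (s : String) : Prop := s = ""
instance (s : String) : Decidable (D_find s) := by unfold D_find; infer_instance
def Spec_find (s : String) (out : Int) : Prop := ¬ D_find s → out = find_alt s
instance (s : String) (out : Int) : Decidable (Spec_find s out) := by unfold Spec_find; infer_instance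
def pvDiffWitness_find : String := ""
def pvDiffWitnessOut_find : Int × Int := (-1, 0)

-- ===== CLAIM (what is proved, stated in full; the proofs are below) =====
def Claim_unchanged_find : Prop := ∀ (s : String), Dom_find s → Spec_find s (find s)
def Claim_changed_find : Prop := Dom_find (pvDiffWitness_find) ∧ D_find (pvDiffWitness_find) ∧ find (pvDiffWitness_find) = pvDiffWitnessOut_find.1 ∧ find_alt (pvDiffWitness_find) = pvDiffWitnessOut_find.2 ∧ pvDiffWitnessOut_find.1 ≠ pvDiffWitnessOut_find.2
def Claim_exact_find : Prop := ∀ (s : String), Dom_find s → D_find s → find s ≠ find_alt s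

-- ===== LEMMAS AND PROOFS =====

-- the cyclic-reflection condition both programs test, phrased over Nat indices
def MatchAt (l : List Char) (e : Nat) : Prop :=
  ∀ j < l.length, l[j]? = l[(e + l.length - 1 - j) % l.length]?

-- Python's s[i - j - 1] (negative wrap) is the cyclic index (i + n - 1 - j) % n
theorem pyGet_opposite (l : List Char) (i j : Nat) (hi : i < l.length) (hj : j < l.length) :
    PySem.List.pyGet? l ((i : Int) - (j : Int) - 1) =
      l[(i + l.length - 1 - j) % l.length]? := by
  rcases lt_or_ge j i with hji | hji
  · have h1 : (i : Int) - (j : Int) - 1 = ((i - j - 1 : Nat) : Int) := by omega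
    rw [h1, PySem.List.pyGet?_natCast]
    have h2 : i + l.length - 1 - j = (i - j - 1) + l.length := by omega
    rw [h2, Nat.add_mod_right, Nat.mod_eq_of_lt (by omega)]
  · have h0 : 0 < j + 1 - i := by omega
    have hle : j + 1 - i ≤ l.length := by omega
    have h1 : (i : Int) - (j : Int) - 1 = -(((j + 1 - i : Nat) : Int)) := by omega
    rw [h1, PySem.List.pyGet?_neg_natCast l (j + 1 - i) h0 hle]
    have h2 : (i + l.length - 1 - j) % l.length = i + l.length - 1 - j :=
      Nat.mod_eq_of_lt (by omega)
    rw [h2]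
    congr 1
    omega

theorem innerLoopA_eq_true_iff (l : List Char) (i : Int) (js : List Int) :
    innerLoopA l i js = true ↔
      ∀ j ∈ js, ¬ (i - j - 1 < PySem.List.len l ∧
        PySem.List.pyGet? l j ≠ PySem.List.pyGet? l (i - j - 1)) := by
  induction js with
  | nil => simp [innerLoopA]
  | cons j js ih =>
    simp only [innerLoopA]
    split_ifs with h
    · simp only [false_iff]
      intro hall
      exact hall j (List.mem_cons_self) h
    · rw [ih]
      constructor
      · intro hall j' hj'
        rcases List.mem_cons.mp hj' with rfl | hm
        · exact h
        · exact hall j' hm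
      · intro hall j' hm
        exact hall j' (List.mem_cons_of_mem _ hm)

theorem innerLoopA_iff_MatchAt (l : List Char) (i : Nat) (hi : i < l.length) :
    innerLoopA l (i : Int) (PySem.List.pyRange 0 (PySem.List.len l) 1) = true ↔ MatchAt l i := by
  rw [innerLoopA_eq_true_iff]
  constructor
  · intro h j hj
    have hmem : (j : Int) ∈ PySem.List.pyRange 0 (PySem.List.len l) 1 := by
      rw [PySem.List.mem_pyRange_one, PySem.List.len_eq]
      constructor <;> [positivity; exact_mod_cast hj]
    have hc := h _ hmem
    have hguard : (i : Int) - (j : Int) - 1 < PySem.List.len l := by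
      rw [PySem.List.len_eq]; omega
    have heq : PySem.List.pyGet? l (j : Int) = PySem.List.pyGet? l ((i : Int) - (j : Int) - 1) := by
      by_contra hne
      exact hc ⟨hguard, hne⟩
    rw [PySem.List.pyGet?_natCast] at heq
    rw [heq, pyGet_opposite l i j hi hj]
  · intro h j hmem
    rw [PySem.List.mem_pyRange_one, PySem.List.len_eq] at hmem
    obtain ⟨h0, h1⟩ := hmem
    have hjn : j.toNat < l.length := by omega
    have hj : j = ((j.toNat : Nat) : Int) := by omega
    intro hc
    apply hc.2
    rw [hj, PySem.List.pyGet?_natCast]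
    have hop := pyGet_opposite l i j.toNat hi hjn
    rw [hop]
    exact h j.toNat hjn

theorem append_self_getElem? (l : List Char) (m : Nat) (hm : m < 2 * l.length) :
    (l ++ l)[m]? = l[m % l.length]? := by
  rcases lt_or_ge m l.length with h | h
  · rw [List.getElem?_append_left h, Nat.mod_eq_of_lt h]
  · have h2 : m % l.length = m - l.length := by
      rw [Nat.mod_eq_sub_mod h, Nat.mod_eq_of_lt (by omega)]
    rw [List.getElem?_append_right h, h2]

theorem prefix_iff_MatchAt (l : List Char) (e : Nat) (_hn : 0 < l.length) (he : e ≤ l.length) :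
    l.reverse <+: (l ++ l).drop e ↔ MatchAt l e := by
  have key : ∀ k, k < l.length → ((l ++ l).drop e)[k]? = l[(e + k) % l.length]? := by
    intro k hk
    rw [List.getElem?_drop, append_self_getElem? l (e + k) (by omega)]
  constructor
  · intro hpre j hj
    have hk : l.length - 1 - j < l.length := by omega
    have h1 : ((l ++ l).drop e)[l.length - 1 - j]? = (l.reverse)[l.length - 1 - j]? := by
      obtain ⟨t, ht⟩ := hpre
      rw [← ht, List.getElem?_append_left (by rw [List.length_reverse]; omega)]
    rw [key _ hk, List.getElem?_reverse hk] at h1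
    have e1 : e + (l.length - 1 - j) = e + l.length - 1 - j := by omega
    have e2 : l.length - 1 - (l.length - 1 - j) = j := by omega
    rw [e1, e2] at h1
    exact h1.symm
  · intro h
    rw [List.prefix_iff_eq_take]
    apply List.ext_getElem?
    intro k
    rcases lt_or_ge k l.length with hk | hk
    · rw [List.getElem?_take_of_lt (by rw [List.length_reverse]; exact hk),
        List.getElem?_reverse hk, key _ hk]
      have hj : l.length - 1 - k < l.length := by omega
      have := (h (l.length - 1 - k) hj).symm
      have e1 : e + l.length - 1 - (l.length - 1 - k) = e + k := by omega
      rw [e1] at this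
      exact this.symm
    · have h1 : (l.reverse)[k]? = none := by
        rw [List.getElem?_eq_none_iff, List.length_reverse]; exact hk
      have h2 : (((l ++ l).drop e).take l.reverse.length)[k]? = none := by
        rw [List.getElem?_eq_none_iff, List.length_take, List.length_reverse]; omega
      rw [h1, h2]

theorem pyRange_find?_eq_some (a b x : Int) (pred : Int → Bool) (hax : a ≤ x) (hxb : x < b)
    (hpx : pred x = true) (hmin : ∀ y, a ≤ y → y < x → pred y = false) :
    (PySem.List.pyRange a b 1).find? pred = some x := by
  generalize hm : (x - a).toNat = m
  induction m generalizing a with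
  | zero =>
    have hax' : a = x := by omega
    subst hax'
    rw [PySem.List.pyRange_one_cons (by omega)]
    simp [hpx]
  | succ m ih =>
    have hax' : a < x := by omega
    rw [PySem.List.pyRange_one_cons (by omega)]
    have hpa : pred a = false := hmin a le_rfl hax'
    rw [List.find?_cons, hpa]
    exact ih (a + 1) (by omega) (fun y hy1 hy2 => hmin y (by omega) hy2) (by omega)

theorem outerLoopA_eq (l : List Char) (rng js : List Int) :
    outerLoopA l rng js =
      match js.find? (fun i => innerLoopA l i rng) with
      | some i => i + PySem.List.len l
      | none => 2 * PySem.List.len l - 1 := by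
  induction js with
  | nil => simp [outerLoopA]
  | cons i is ih =>
    by_cases h : innerLoopA l i rng = true
    · simp [outerLoopA, h]
    · rw [outerLoopA, if_neg (by simp [h]), ih, List.find?_cons]
      simp [h]

-- a prefix at any admissible offset makes Chars.find succeed
theorem charsFind_ne_neg_one_of_prefix (l : List Char) (e : Nat)
    (hpre : l.reverse <+: (l ++ l).drop e) :
    PySem.Chars.find (l ++ l) l.reverse ≠ -1 := by
  rw [PySem.Chars.find_ne_neg_one_iff, ← PySem.Chars.isIn_iff_infix,
    ← PySem.Chars.exists_prefix_drop_iff_isIn]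
  exact ⟨e, hpre⟩

theorem find_spec : Claim_unchanged_find := by
  intro s _ hD
  unfold D_find at hD
  have hne : s.toList ≠ [] := fun h => hD (String.toList_eq_nil_iff.mp h)
  set l := s.toList with hl
  have hn : 0 < l.length := List.length_pos_iff.mpr hne
  show find s = find_alt s
  unfold find find_alt
  simp only [← hl]
  rw [outerLoopA_eq]
  by_cases hF : PySem.Chars.find (l ++ l) l.reverse = -1
  · rw [if_neg (by simpa using hF)]
    have hnone : (PySem.List.pyRange 0 (PySem.List.len l) 1).find?
        (fun i => innerLoopA l i (PySem.List.pyRange 0 (PySem.List.len l) 1)) = none := by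
      rw [List.find?_eq_none]
      intro i hmem
      rw [PySem.List.mem_pyRange_one, PySem.List.len_eq] at hmem
      intro hflag
      have hi : i.toNat < l.length := by omega
      have hcast : ((i.toNat : Nat) : Int) = i := by omega
      rw [← hcast] at hflag
      have hmatch := (innerLoopA_iff_MatchAt l i.toNat hi).mp hflag
      have hpre := (prefix_iff_MatchAt l i.toNat hn (by omega)).mpr hmatch
      exact charsFind_ne_neg_one_of_prefix l i.toNat hpre hF
    rw [hnone]
  · rw [if_pos (by simpa using hF)]
    have h0F : 0 ≤ PySem.Chars.find (l ++ l) l.reverse := by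
      have := PySem.Chars.neg_one_le_find (l ++ l) l.reverse
      omega
    obtain ⟨hpre, hmin⟩ := PySem.Chars.find_spec (s := l ++ l) (sub := l.reverse) h0F
    set e := (PySem.Chars.find (l ++ l) l.reverse).toNat with hedef
    have hlen : l.length ≤ ((l ++ l).drop e).length := by
      have := hpre.length_le
      simpa [List.length_reverse] using this
    have hen : e ≤ l.length := by
      rw [List.length_drop, List.length_append] at hlen
      omega
    have heln : e < l.length := by
      rcases Nat.lt_or_ge e l.length with h | h
      · exact h
      · exfalso
        have hee : e = l.length := by omega
        have hm : MatchAt l e := (prefix_iff_MatchAt l e hn hen).mp hpre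
        have hm0 : MatchAt l 0 := by
          intro j hj
          have := hm j hj
          have e1 : e + l.length - 1 - j = (l.length - 1 - j) + l.length := by omega
          have e2 : 0 + l.length - 1 - j = l.length - 1 - j := by omega
          rw [e1, Nat.add_mod_right] at this
          rw [e2]
          exact this
        have hpre0 := (prefix_iff_MatchAt l 0 hn (by omega)).mpr hm0
        exact hmin 0 (by omega) (by simpa using hpre0)
    have hsome : (PySem.List.pyRange 0 (PySem.List.len l) 1).find?
        (fun i => innerLoopA l i (PySem.List.pyRange 0 (PySem.List.len l) 1)) = some (e : Int) := by
      apply pyRange_find?_eq_some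
      · positivity
      · rw [PySem.List.len_eq]; exact_mod_cast heln
      · exact (innerLoopA_iff_MatchAt l e heln).mpr ((prefix_iff_MatchAt l e hn hen).mp hpre)
      · intro y hy0 hye
        by_contra hflag
        rw [Bool.not_eq_false] at hflag
        have hyn : y.toNat < l.length := by omega
        have hcast : ((y.toNat : Nat) : Int) = y := by omega
        rw [← hcast] at hflag
        have hmatch := (innerLoopA_iff_MatchAt l y.toNat hyn).mp hflag
        have hprey := (prefix_iff_MatchAt l y.toNat hn (by omega)).mpr hmatch
        exact hmin y.toNat (by omega) hprey
    rw [hsome]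
    have : ((e : Nat) : Int) = PySem.Chars.find (l ++ l) l.reverse := by omega
    rw [this]

-- ===== VERDICT (by name: the statement is the Claim_ definition above) =====
theorem find_changed : Claim_changed_find := by unfold Claim_changed_find; decide

theorem find_tight : Claim_exact_find := by
  intro s _ hD
  unfold D_find at hD
  subst hD
  decide
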